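-- pv_equiv track=rewrite | github.com/pollycore/wallet-cli | python/pollyweb_cli/features/test.py | build_parallel_test_status_message
-- ===== SOURCE A (Python) =====
-- from dataclasses import dataclass, field
--
-- PARALLEL_STATUS_ROOT_LABEL = ""
--
-- @dataclass
-- class _ParallelStatusNode:
--     """Represent one branch in the hierarchical parallel test status view."""
--
--     label: str
--     children: dict[str, "_ParallelStatusNode"] = field(default_factory = dict)
--
-- def _is_group_label(label: str) -> bool:
--     """Return whether one status label refers to a group rather than a fixture."""
--
--     return (
--         label == PARALLEL_STATUS_ROOT_LABEL
--         or
--         label.startswith("files ")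
--         or label.startswith("folders ")
--         or label.startswith("✔️ Passed:")
--     )
--
-- def build_parallel_test_status_message(
--     active_paths: list[tuple[str, ...]]
-- ) -> str:
--     """Render the flat status text for active parallel test work."""
--
--     root = _ParallelStatusNode(label = "Testing messages in parallel")
--
--     for path in active_paths:
--         node_stack: list[_ParallelStatusNode] = [root]
--         last_unindented_depth = 0
--
--         for raw_label in path:
--             stripped_label = raw_label.lstrip(" ")
--             indent_width = len(raw_label) - len(stripped_label)
--             indent_levels = indent_width // 2
--
--             if indent_levels > 0:
--                 depth = last_unindented_depth + indent_levels
--             else: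
--                 depth = len(node_stack)
--                 last_unindented_depth = depth
--
--             while len(node_stack) > depth:
--                 node_stack.pop()
--
--             parent = node_stack[-1]
--             current = parent.children.setdefault(
--                 stripped_label,
--                 _ParallelStatusNode(label = stripped_label),
--             )
--             node_stack.append(current)
--
--     lines: list[str] = []
--
--     def append_children(
--         node: _ParallelStatusNode,
--     ) -> None:
--         """Append all non-group labels from one node subtree."""
--
--         for child in node.children.values():
--             if not _is_group_label(child.label):
--                 lines.append(child.label)
--             append_children(child)
--
--     append_children(root)
--     return "\n".join(lines)
-- ===== SOURCE B (Python) =====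
-- PARALLEL_STATUS_ROOT_LABEL = ""
--
-- def _is_group_label(label):
--     return (
--         label == PARALLEL_STATUS_ROOT_LABEL
--         or label.startswith("files ")
--         or label.startswith("folders ")
--         or label.startswith("✔️ Passed:")
--     )
--
-- def build_parallel_test_status_message(active_paths):
--     """No mutable node tree: phase 1 resolves every visited node to its full
--     key path (a tuple of stripped labels from the root); phase 2 dedupes the
--     occurrences keeping first occurrence, and emits pre-order by recursing on
--     path prefixes, children of q being the deduped paths extending q by one
--     label, in first-occurrence order (= the tree's insertion order)."""
--
--     occurrences = []
--     for path in active_paths: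
--         prefix = ()
--         last_unindented_depth = 0
--         for raw_label in path:
--             stripped_label = raw_label.lstrip(" ")
--             indent_levels = (len(raw_label) - len(stripped_label)) // 2
--             if indent_levels > 0:
--                 depth = last_unindented_depth + indent_levels
--             else:
--                 depth = len(prefix) + 1
--                 last_unindented_depth = depth
--             prefix = prefix[:depth - 1] + (stripped_label,)
--             occurrences.append(prefix)
--
--     nodes = []
--     for p in occurrences:
--         if p not in nodes:
--             nodes.append(p)
--
--     lines = []
--
--     def emit(q):
--         for p in nodes:
--             if len(p) == len(q) + 1 and p[:len(q)] == q:
--                 if not _is_group_label(p[-1]):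
--                     lines.append(p[-1])
--                 emit(p)
--
--     emit(())
--     return "\n".join(lines)
-- ===== Notes on version B (the rewrite author's own statement) =====
-- stated objective: alternative
-- what changed: B drops the mutable node tree entirely: it first resolves every visited node to its full key path (tuple of stripped labels), dedupes those paths keeping first occurrence, and then emits pre-order by recursing on path prefixes, the children of a prefix q being the deduped paths extending q by one label in first-occurrence order (which equals the tree's dict insertion order).
import Mathlib
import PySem

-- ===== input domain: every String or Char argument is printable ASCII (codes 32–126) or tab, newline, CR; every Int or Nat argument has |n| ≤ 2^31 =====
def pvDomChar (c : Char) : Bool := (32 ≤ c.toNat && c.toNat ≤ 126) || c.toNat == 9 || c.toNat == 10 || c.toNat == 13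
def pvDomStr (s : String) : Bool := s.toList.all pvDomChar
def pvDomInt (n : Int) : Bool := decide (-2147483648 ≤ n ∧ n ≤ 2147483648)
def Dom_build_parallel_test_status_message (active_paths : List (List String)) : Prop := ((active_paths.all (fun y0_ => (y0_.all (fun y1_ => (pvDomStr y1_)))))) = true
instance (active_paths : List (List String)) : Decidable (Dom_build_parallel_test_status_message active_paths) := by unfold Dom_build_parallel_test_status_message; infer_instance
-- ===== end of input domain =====

-- B drops A's mutable node tree: it resolves every visited node to its full key
-- path, dedupes those paths keeping first occurrence, and emits pre-order by
-- recursing on path prefixes (objective: alternative; not faster).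

-- ===== PORT A =====
def pvGroupLabel (label : String) : Bool :=
  label == ""
    || PySem.Str.startswith label "files "
    || PySem.Str.startswith label "folders "
    || PySem.Str.startswith label "✔️ Passed:"

abbrev pvArena := List (String × PySem.Dict String Nat)

-- 'while len(node_stack) > depth: node_stack.pop()'  (stack stored top-first, so
-- Python's pop from the end is dropping the head)
def pvPopTo : List Nat → Nat → List Nat
  | [], _ => []
  | s :: rest, d => if rest.length + 1 > d then pvPopTo rest d else s :: rest

-- 'parent.children.setdefault(stripped_label, _ParallelStatusNode(stripped_label))'
-- in the arena model (a node is an index into the arena): returns the (possibly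
-- extended) arena and the child's index
def pvSetdefault (arena : pvArena) (parent : Nat) (stripped : String) : pvArena × Nat :=
  let pnode := arena.getD parent ("", PySem.Dict.empty)
  match pnode.2.get? stripped with
  | some c => (arena, c)
  | none =>
      let idx := arena.length
      ((arena.set parent (pnode.1, pnode.2.insert stripped idx)) ++ [(stripped, PySem.Dict.empty)],
       idx)

-- one iteration of 'for raw_label in path' ; state = (arena, node_stack top-first, last_unindented_depth)
def pvStep (st : pvArena × List Nat × Nat) (raw : String) : pvArena × List Nat × Nat :=
  let arena := st.1
  let stack := st.2.1
  let lud := st.2.2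
  -- raw_label.lstrip(" "): drop leading spaces only (exact, hand-ported)
  let scs := raw.toList.dropWhile (fun c => c == ' ')
  let stripped := String.ofList scs
  let indentLevels := (raw.toList.length - scs.length) / 2
  let dl := if indentLevels > 0 then (lud + indentLevels, lud) else (stack.length, stack.length)
  let stack' := pvPopTo stack dl.1
  let parent := stack'.headD 0
  let res := pvSetdefault arena parent stripped
  (res.1, res.2 :: stack', dl.2)

def pvBuild (active_paths : List (List String)) : pvArena :=
  active_paths.foldl
    (fun arena path => (path.foldl pvStep (arena, [0], 0)).1)
    [("Testing messages in parallel", PySem.Dict.empty)]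

-- recursive append_children; fuel (= arena size) is only a totality guard for the
-- kernel: the arena built above is a tree with child indices strictly increasing
def pvAppendChildren (arena : pvArena) : Nat → Nat → List String → List String
  | 0, _, lines => lines
  | fuel+1, idx, lines =>
      ((arena.getD idx ("", PySem.Dict.empty)).2.values).foldl
        (fun lines c =>
          let lab := (arena.getD c ("", PySem.Dict.empty)).1
          let lines := if !pvGroupLabel lab then lines ++ [lab] else lines
          pvAppendChildren arena fuel c lines)
        lines

def build_parallel_test_status_message (active_paths : List (List String)) : String :=
  let arena := pvBuild active_paths
  PySem.Str.join "\n" (pvAppendChildren arena arena.length 0 [])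

-- ===== PORT B =====
-- (Source B: no node objects — phase 1 resolves each visited node to its full key
--  path; phase 2 dedupes keeping first occurrence; phase 3 emits pre-order by
--  recursion on path prefixes)

-- one iteration of Source B's inner 'for raw_label in path';
-- state = (occurrences, prefix, last_unindented_depth)
def pvBStep (st : List (List String) × List String × Nat) (raw : String) :
    List (List String) × List String × Nat :=
  let occ := st.1
  let pfx := st.2.1
  let lud := st.2.2
  let scs := raw.toList.dropWhile (fun c => c == ' ')
  let stripped := String.ofList scs
  let indentLevels := (raw.toList.length - scs.length) / 2
  let dl := if indentLevels > 0 then (lud + indentLevels, lud) else (pfx.length + 1, pfx.length + 1)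
  -- prefix[:depth - 1] + (stripped,)  (depth ≥ 1, so the slice bound is ≥ 0 and
  -- Python's slice is List.take exactly)
  let pfx' := pfx.take (dl.1 - 1) ++ [stripped]
  (occ ++ [pfx'], pfx', dl.2)

def pvOcc (active_paths : List (List String)) : List (List String) :=
  active_paths.foldl (fun occ path => (path.foldl pvBStep (occ, [], 0)).1) []

-- 'for p in occurrences: if p not in nodes: nodes.append(p)'
def pvNodes (occ : List (List String)) : List (List String) :=
  occ.foldl (fun ns p => if p ∈ ns then ns else ns ++ [p]) []

-- Source B's recursive emit; fuel (= number of deduped nodes + 1) is only a totality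
-- guard: each recursive call goes to a strictly longer deduped path.
-- p[-1] is ported as p.getLastD "" (every deduped path is nonempty, Python never
-- hits p[-1] on an empty tuple); p[:len(q)] is List.take (bound ≥ 0, exact).
def pvEmitRec (nodes : List (List String)) : Nat → List String → List String → List String
  | 0, _, lines => lines
  | fuel+1, q, lines =>
      nodes.foldl
        (fun lines p =>
          if p.length == q.length + 1 && p.take q.length == q then
            pvEmitRec nodes fuel p
              (if !pvGroupLabel (p.getLastD "") then lines ++ [p.getLastD ""] else lines)
          else lines)
        lines

def build_parallel_test_status_message_alt (active_paths : List (List String)) : String :=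
  let nodes := pvNodes (pvOcc active_paths)
  PySem.Str.join "\n" (pvEmitRec nodes (nodes.length + 1) [] [])

-- ===== PRECONDITION & SPEC =====
def Spec_build_parallel_test_status_message (active_paths : List (List String)) (out : String) : Prop := out = build_parallel_test_status_message_alt active_paths
instance (active_paths : List (List String)) (out : String) : Decidable (Spec_build_parallel_test_status_message active_paths out) := by unfold Spec_build_parallel_test_status_message; infer_instance

-- ===== CLAIM (what is proved, stated in full; the proofs are below) =====
def Claim_equal_build_parallel_test_status_message : Prop := ∀ (active_paths : List (List String)), Dom_build_parallel_test_status_message active_paths → Spec_build_parallel_test_status_message active_paths (build_parallel_test_status_message active_paths)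

-- ===== LEMMAS AND PROOFS =====

abbrev pvD : String × PySem.Dict String Nat := ("", PySem.Dict.empty)

-- indexed view of a list (Nat indices from n)
def pvEnum {α : Type} : Nat → List α → List (Nat × α)
  | _, [] => []
  | n, x :: xs => (n, x) :: pvEnum (n+1) xs

lemma pvEnum_append_one {α : Type} (n : Nat) (l : List α) (x : α) :
    pvEnum n (l ++ [x]) = pvEnum n l ++ [(n + l.length, x)] := by
  induction l generalizing n with
  | nil => simp [pvEnum]
  | cons a t ih => simp [pvEnum, ih, Nat.add_assoc, Nat.add_comm 1 t.length]

lemma pvEnum_mem {α : Type} (d : α) :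
    ∀ (l : List α) (n : Nat) (jp : Nat × α), jp ∈ pvEnum n l →
      n ≤ jp.1 ∧ jp.1 - n < l.length ∧ l.getD (jp.1 - n) d = jp.2 := by
  intro l
  induction l with
  | nil => intro n jp h; simp [pvEnum] at h
  | cons a t ih =>
    intro n jp h
    rcases List.mem_cons.mp h with h | h
    · subst h; simp
    · obtain ⟨h1, h2, h3⟩ := ih (n+1) jp h
      refine ⟨by omega, by simp; omega, ?_⟩
      obtain ⟨k, hk⟩ : ∃ k, jp.1 - n = k + 1 := ⟨jp.1 - (n+1), by omega⟩
      rw [hk, List.getD_cons_succ]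
      have : jp.1 - (n+1) = k := by omega
      rw [← this]; exact h3

lemma pvEnum_mem_of {α : Type} (d : α) :
    ∀ (l : List α) (n k : Nat), k < l.length → (n + k, l.getD k d) ∈ pvEnum n l := by
  intro l
  induction l with
  | nil => intro n k h; simp at h
  | cons a t ih =>
    intro n k h
    cases k with
    | zero => simp [pvEnum]
    | succ k =>
      have := ih (n+1) k (by simpa using h)
      simp only [pvEnum, List.getD_cons_succ]
      refine List.mem_cons_of_mem _ ?_
      have he : n + (k + 1) = (n + 1) + k := by omega
      rw [he]
      exact this

lemma pvEnum_filter_map_snd {α : Type} (C : α → Bool) :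
    ∀ (l : List α) (n : Nat),
      ((pvEnum n l).filter (fun jp => C jp.2)).map (fun jp => jp.2) = l.filter C := by
  intro l
  induction l with
  | nil => intro n; simp [pvEnum]
  | cons a t ih =>
    intro n
    simp only [pvEnum, List.filter_cons]
    by_cases h : C a
    · simp [h, ih]
    · simp [h, ih]

-- the child test Source B performs, as a predicate on the candidate path
def pvChildC (q p : List String) : Bool := p.length == q.length + 1 && p.take q.length == q

lemma pvChildC_nil (q : List String) : pvChildC q [] = false := by simp [pvChildC]

lemma pvChildC_self_append (q : List String) (x : String) : pvChildC q (q ++ [x]) = true := by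
  simp [pvChildC]

lemma pvChildC_decomp (q p : List String) (h : pvChildC q p = true) :
    p = q ++ [p.getLastD ""] ∧ p.dropLast = q ∧ p ≠ [] := by
  simp only [pvChildC, Bool.and_eq_true, beq_iff_eq] at h
  obtain ⟨hl, ht⟩ := h
  have hlen : (p.drop q.length).length = 1 := by simp [hl]
  obtain ⟨a, ha⟩ := List.length_eq_one_iff.mp hlen
  have hp : p = q ++ [a] := by rw [← ht, ← ha, List.take_append_drop]
  have hla : p.getLastD "" = a := by rw [hp, List.getLastD_concat]
  refine ⟨by rw [hla]; exact hp, by rw [hp, List.dropLast_concat], by rw [hp]; simp⟩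

def pvKids (P : List (List String)) (q : List String) : List (Nat × List String) :=
  (pvEnum 0 P).filter (fun jp => pvChildC q jp.2)

def pvChildItems (P : List (List String)) (q : List String) : List (String × Nat) :=
  (pvKids P q).map (fun jp => (jp.2.getLastD "", jp.1))

lemma pvKids_append_one (P : List (List String)) (q p' : List String) :
    pvKids (P ++ [p']) q
      = pvKids P q ++ (if pvChildC q p' then [(P.length, p')] else []) := by
  simp only [pvKids, pvEnum_append_one, List.filter_append, Nat.zero_add]
  congr 1
  by_cases h : pvChildC q p' <;> simp [h]

lemma pvChildItems_append_one (P : List (List String)) (q p' : List String) :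
    pvChildItems (P ++ [p']) q
      = pvChildItems P q ++ (if pvChildC q p' then [(p'.getLastD "", P.length)] else []) := by
  simp only [pvChildItems, pvKids_append_one, List.map_append]
  congr 1
  by_cases h : pvChildC q p' <;> simp [h]

lemma pvKids_mem (P : List (List String)) (q : List String) (jp : Nat × List String)
    (h : jp ∈ pvKids P q) :
    jp.1 < P.length ∧ P.getD jp.1 [] = jp.2 ∧ pvChildC q jp.2 = true := by
  obtain ⟨hm, hC⟩ := List.mem_filter.mp h
  obtain ⟨_, h2, h3⟩ := pvEnum_mem ([] : List String) P 0 jp hm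
  simpa using ⟨h2, h3, hC⟩

lemma pvKids_mem_of (P : List (List String)) (q : List String) (j : Nat)
    (hj : j < P.length) (hC : pvChildC q (P.getD j []) = true) :
    (j, P.getD j []) ∈ pvKids P q := by
  refine List.mem_filter.mpr ⟨?_, by simpa using hC⟩
  simpa using pvEnum_mem_of ([] : List String) P 0 j hj

lemma pvGetD_lt {α : Type} (l : List α) (d : α) (k : Nat) (h : k < l.length) :
    l.getD k d = l[k] := by
  simp [List.getD_eq_getElem?_getD, List.getElem?_eq_getElem h]

lemma pvIdx_unique (P : List (List String)) (hnd : P.Nodup) {i j : Nat}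
    (hi : i < P.length) (hj : j < P.length) (h : P.getD i [] = P.getD j []) : i = j := by
  rw [pvGetD_lt _ _ _ hi, pvGetD_lt _ _ _ hj] at h
  exact (List.Nodup.getElem_inj_iff hnd).mp h

lemma pvGetD_append_lt {α : Type} (l : List α) (x d : α) (j : Nat) (h : j < l.length) :
    (l ++ [x]).getD j d = l.getD j d := by
  simp [List.getD_eq_getElem?_getD, List.getElem?_append_left h]

lemma pvGetD_append_self {α : Type} (l : List α) (x d : α) :
    (l ++ [x]).getD l.length d = x := by
  simp [List.getD_eq_getElem?_getD]

lemma pvGetD_take {α : Type} (l : List α) : ∀ (m k : Nat) (d : α), k < m →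
    (l.take m).getD k d = l.getD k d := by
  induction l with
  | nil => simp
  | cons a t ih =>
    intro m k d h
    cases m with
    | zero => omega
    | succ m =>
      cases k with
      | zero => simp
      | succ k => simpa using ih m k d (by omega)

lemma pvTake_append_left {α : Type} (l : List α) (x : α) : ∀ (k : Nat), k ≤ l.length →
    (l ++ [x]).take k = l.take k := by
  induction l with
  | nil =>
    intro k h
    have hk : k = 0 := by simpa using h
    simp [hk]
  | cons a t ih =>
    intro k h
    cases k with
    | zero => simp
    | succ k => simpa using ih k (by simpa using h)

lemma pvPopTo_eq_drop (s : List Nat) (d : Nat) : pvPopTo s d = s.drop (s.length - d) := by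
  induction s with
  | nil => simp [pvPopTo]
  | cons a t ih =>
    simp only [pvPopTo, List.length_cons]
    by_cases h : t.length + 1 > d
    · rw [if_pos h, ih]
      have he : t.length + 1 - d = (t.length - d) + 1 := by omega
      rw [he, List.drop_succ_cons]
    · rw [if_neg h]
      have he : t.length + 1 - d = 0 := by omega
      rw [he, List.drop_zero]

lemma pvHeadD_eq_reverse_getD (s : List Nat) :
    s.headD 0 = s.reverse.getD (s.length - 1) 0 := by
  cases s with
  | nil => simp
  | cons a t =>
    simp only [List.headD_cons, List.reverse_cons, List.length_cons, Nat.add_sub_cancel]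
    rw [← List.length_reverse (as := t), pvGetD_append_self]

lemma pvNodes_append_one (occ : List (List String)) (p : List String) :
    pvNodes (occ ++ [p])
      = if p ∈ pvNodes occ then pvNodes occ else pvNodes occ ++ [p] := by
  simp [pvNodes, List.foldl_append]

-- the tree A builds, related to the deduped path list B builds.  P is the path
-- list with the root path [] in front; arena index i corresponds to path P[i].
structure pvRel (arena : pvArena) (P : List (List String)) : Prop where
  len : arena.length = P.length
  nodup : P.Nodup
  head : P.getD 0 [] = []
  pos : 0 < P.length
  node : ∀ j, 0 < j → j < P.length →
    (P.getD j [] ≠ [] ∧ (P.getD j []).dropLast ∈ P.take j ∧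
      (arena.getD j pvD).1 = (P.getD j []).getLastD "")
  items : ∀ i, i < P.length →
    (arena.getD i pvD).2.items = pvChildItems P (P.getD i [])

-- A's node stack corresponds to the chain of prefixes of B's current prefix
structure pvStackOK (P : List (List String)) (stack : List Nat) (pfx : List String) : Prop where
  len : stack.length = pfx.length + 1
  ok : ∀ k, k < pfx.length + 1 →
    (stack.reverse.getD k 0 < P.length ∧ P.getD (stack.reverse.getD k 0) [] = pfx.take k)


lemma pvStepCore (arena : pvArena) (stack : List Nat) (occ : List (List String))
    (pfx : List String) (s : String) (depth : Nat) (hd : 1 ≤ depth)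
    (hR : pvRel arena ([] :: pvNodes occ))
    (hS : pvStackOK ([] :: pvNodes occ) stack pfx) :
    pvRel (pvSetdefault arena ((pvPopTo stack depth).headD 0) s).1
        ([] :: pvNodes (occ ++ [pfx.take (depth - 1) ++ [s]])) ∧
    pvStackOK ([] :: pvNodes (occ ++ [pfx.take (depth - 1) ++ [s]]))
      ((pvSetdefault arena ((pvPopTo stack depth).headD 0) s).2 :: pvPopTo stack depth)
      (pfx.take (depth - 1) ++ [s]) := by
  obtain ⟨hslen, hok⟩ := hS
  have hRlen := hR.len
  set P := ([] :: pvNodes occ) with hP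
  set st' := pvPopTo stack depth with hst'
  have hdrop : st' = stack.drop (stack.length - depth) := pvPopTo_eq_drop stack depth
  have hlen' : st'.length = min depth (pfx.length + 1) := by
    rw [hdrop, List.length_drop]; omega
  have hrev : st'.reverse = stack.reverse.take (min depth (pfx.length + 1)) := by
    rw [hdrop, List.reverse_drop]
    congr 1
    omega
  set m := min depth (pfx.length + 1) with hm
  have hm1 : 1 ≤ m := by omega
  set q := pfx.take (depth - 1) with hq
  have hqlen : q.length = m - 1 := by rw [hq, List.length_take]; omega
  have hok' : ∀ k, k < m → st'.reverse.getD k 0 < P.length ∧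
      P.getD (st'.reverse.getD k 0) [] = q.take k := by
    intro k hk
    have h1 : st'.reverse.getD k 0 = stack.reverse.getD k 0 := by
      rw [hrev]; exact pvGetD_take _ m k 0 hk
    rw [h1]
    obtain ⟨ha, hb⟩ := hok k (by omega)
    refine ⟨ha, ?_⟩
    rw [hq, List.take_take, show min k (depth - 1) = k from by omega]
    exact hb
  set parent := st'.headD 0 with hpar
  have hparent_eq : parent = st'.reverse.getD (m - 1) 0 := by
    rw [hpar, pvHeadD_eq_reverse_getD, hlen']
  obtain ⟨hpP, hpq⟩ := hok' (m - 1) (by omega)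
  rw [← hparent_eq] at hpP hpq
  rw [List.take_of_length_le (by omega)] at hpq
  set p' := q ++ [s] with hp'
  have hp'len : p'.length = m := by rw [hp', List.length_append, hqlen]; simp; omega
  have hp'last : p'.getLastD "" = s := by rw [hp', List.getLastD_concat]
  have hp'drop : p'.dropLast = q := by rw [hp', List.dropLast_concat]
  have hp'ne : p' ≠ [] := by rw [hp']; simp
  have hCq : pvChildC q p' = true := by rw [hp']; exact pvChildC_self_append q s
  have hitems := hR.items parent hpP
  rw [hpq] at hitems
  unfold pvSetdefault
  dsimp only
  split
  case h_1 c heq =>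
    -- the child already exists: arena and the deduped node list are unchanged
    have hmem := PySem.Dict.mem_items_of_get?_eq_some _ heq
    rw [hitems] at hmem
    obtain ⟨jp, hjp, hpair⟩ := List.mem_map.mp hmem
    injection hpair with hl1 hl2
    obtain ⟨hjlt, hjget, hjC⟩ := pvKids_mem P q jp hjp
    obtain ⟨hdec, _, _⟩ := pvChildC_decomp q jp.2 hjC
    have hPc : P.getD c [] = p' := by
      rw [← hl2, hjget, hp', ← hl1]
      exact hdec
    have hc_lt : c < P.length := hl2 ▸ hjlt
    have hc_ne0 : c ≠ 0 := by
      intro h0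
      rw [h0, hR.head] at hPc
      exact hp'ne hPc.symm
    obtain ⟨k, hk⟩ : ∃ k, c = k + 1 := ⟨c - 1, by omega⟩
    have hkP : k < (pvNodes occ).length := by
      have h2 := hc_lt
      rw [hP] at h2
      simp only [List.length_cons] at h2
      omega
    have hPc' := hPc
    rw [hk, hP, List.getD_cons_succ, pvGetD_lt _ _ _ hkP] at hPc'
    have hmemN : p' ∈ pvNodes occ := hPc' ▸ List.getElem_mem _
    have hnodes : pvNodes (occ ++ [p']) = pvNodes occ := by
      rw [pvNodes_append_one, if_pos hmemN]
    rw [hnodes]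
    refine ⟨hR, ?_, ?_⟩
    · simp only [List.length_cons, hlen', hp'len]
    · intro k2 hkb
      have hrevc : ((c :: st').reverse) = st'.reverse ++ [c] := by simp
      have hrlen : st'.reverse.length = m := by rw [List.length_reverse]; exact hlen'
      have hkb' : k2 < m + 1 := by
        have := hkb
        rw [hp'len] at this
        exact this
      rcases Nat.lt_or_ge k2 m with hkm | hkm
      · rw [hrevc, pvGetD_append_lt _ _ _ _ (by omega)]
        obtain ⟨h1, h2⟩ := hok' k2 hkm
        refine ⟨h1, ?_⟩
        rw [h2, hp', pvTake_append_left q s k2 (by omega)]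
      · have hkm' : k2 = m := by omega
        subst hkm'
        rw [hrevc, ← hrlen, pvGetD_append_self]
        refine ⟨hc_lt, ?_⟩
        rw [hPc, List.take_of_length_le (by omega)]
  case h_2 heq =>
    -- a new child node is created; both sides append it
    have hnP : arena.length = P.length := hRlen
    have hnotinP : p' ∉ P := by
      intro hmem2
      obtain ⟨j, hj, hje⟩ := List.mem_iff_getElem.mp hmem2
      have hjget : P.getD j [] = p' := by rw [pvGetD_lt _ _ _ hj, hje]
      have hC : pvChildC q (P.getD j []) = true := by rw [hjget]; exact hCq
      have hkid := pvKids_mem_of P q j hj hC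
      have hitem : (s, j) ∈ pvChildItems P q := by
        refine List.mem_map.mpr ⟨(j, P.getD j []), hkid, ?_⟩
        rw [hjget, hp'last]
      rw [← hitems] at hitem
      have hkeys : s ∈ (arena.getD parent ("", PySem.Dict.empty)).2.keys :=
        PySem.Dict.mem_keys_of_mem_items _ hitem
      exact ((PySem.Dict.get?_eq_none_iff_not_mem_keys _ _).mp heq) hkeys
    have hnotinN : p' ∉ pvNodes occ := fun h =>
      hnotinP (by rw [hP]; exact List.mem_cons_of_mem _ h)
    have hnodes : pvNodes (occ ++ [p']) = pvNodes occ ++ [p'] := by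
      rw [pvNodes_append_one, if_neg hnotinN]
    rw [hnodes]
    have hPP : ([] :: (pvNodes occ ++ [p'])) = P ++ [p'] := by rw [hP]; rfl
    rw [hPP]
    have hcontains : (arena.getD parent ("", PySem.Dict.empty)).2.contains s = false := by
      rw [PySem.Dict.contains_eq_isSome_get?, heq]
      rfl
    have hsetlen : (arena.set parent
        ((arena.getD parent ("", PySem.Dict.empty)).1,
         (arena.getD parent ("", PySem.Dict.empty)).2.insert s arena.length)).length
        = arena.length := by simp
    have hgetPar : ((arena.set parent
        ((arena.getD parent ("", PySem.Dict.empty)).1,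
         (arena.getD parent ("", PySem.Dict.empty)).2.insert s arena.length))
          ++ [(s, PySem.Dict.empty)]).getD parent ("", PySem.Dict.empty)
        = ((arena.getD parent ("", PySem.Dict.empty)).1,
           (arena.getD parent ("", PySem.Dict.empty)).2.insert s arena.length) := by
      rw [pvGetD_append_lt _ _ _ _ (by rw [hsetlen]; omega)]
      rw [List.getD_eq_getElem?_getD, List.getElem?_set_self (by omega)]
      rfl
    have hgetOther : ∀ j, j < arena.length → j ≠ parent →
        ((arena.set parent
            ((arena.getD parent ("", PySem.Dict.empty)).1,
             (arena.getD parent ("", PySem.Dict.empty)).2.insert s arena.length))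
          ++ [(s, PySem.Dict.empty)]).getD j ("", PySem.Dict.empty)
        = arena.getD j ("", PySem.Dict.empty) := by
      intro j hj hne
      rw [pvGetD_append_lt _ _ _ _ (by rw [hsetlen]; omega)]
      rw [List.getD_eq_getElem?_getD, List.getElem?_set_ne (by omega),
        ← List.getD_eq_getElem?_getD]
    have hgetNew : ((arena.set parent
        ((arena.getD parent ("", PySem.Dict.empty)).1,
         (arena.getD parent ("", PySem.Dict.empty)).2.insert s arena.length))
          ++ [(s, PySem.Dict.empty)]).getD arena.length ("", PySem.Dict.empty)
        = (s, PySem.Dict.empty) := by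
      have h0 := pvGetD_append_self (arena.set parent
        ((arena.getD parent ("", PySem.Dict.empty)).1,
         (arena.getD parent ("", PySem.Dict.empty)).2.insert s arena.length))
        ((s, PySem.Dict.empty)) ("", PySem.Dict.empty)
      rw [hsetlen] at h0
      exact h0
    have hP'lt : ∀ j, j < P.length → (P ++ [p']).getD j [] = P.getD j [] := by
      intro j hj; exact pvGetD_append_lt _ _ _ _ hj
    have hP'new : (P ++ [p']).getD P.length [] = p' := pvGetD_append_self _ _ _
    have hgetNew' : ((arena.set parent
        ((arena.getD parent ("", PySem.Dict.empty)).1,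
         (arena.getD parent ("", PySem.Dict.empty)).2.insert s arena.length))
          ++ [(s, PySem.Dict.empty)]).getD P.length ("", PySem.Dict.empty)
        = (s, PySem.Dict.empty) := by rw [← hnP]; exact hgetNew
    refine ⟨⟨?_, ?_, ?_, ?_, ?_, ?_⟩, ?_, ?_⟩
    · simp [hnP]
    · rw [List.nodup_append]
      refine ⟨hR.nodup, List.nodup_singleton _, ?_⟩
      intro a ha b hb
      rw [List.mem_singleton] at hb
      subst hb
      intro hEq
      exact hnotinP (hEq ▸ ha)
    · rw [hP'lt 0 hR.pos, hR.head]
    · simp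
    · intro j hj0 hj1
      simp only [List.length_append, List.length_cons, List.length_nil] at hj1
      rcases Nat.lt_or_ge j P.length with hjlt | hjge
      · rw [hP'lt j hjlt]
        obtain ⟨h1, h2, h3⟩ := hR.node j hj0 hjlt
        refine ⟨h1, ?_, ?_⟩
        · rw [pvTake_append_left P p' j (by omega)]
          exact h2
        · rcases eq_or_ne j parent with rfl | hne
          · rw [hgetPar]
            exact h3
          · rw [hgetOther j (by omega) hne]
            exact h3
      · have hje : j = P.length := by omega
        subst hje
        rw [hP'new]
        refine ⟨hp'ne, ?_, ?_⟩
        · rw [hp'drop, pvTake_append_left P p' P.length (le_refl _), List.take_length]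
          have hmemq : P.getD parent [] ∈ P := by
            rw [pvGetD_lt _ _ _ hpP]
            exact List.getElem_mem _
          rw [← hpq]
          exact hmemq
        · rw [hgetNew', hp'last]
    · intro i hi
      simp only [List.length_append, List.length_cons, List.length_nil] at hi
      rcases Nat.lt_or_ge i P.length with hilt | hige
      · rw [hP'lt i hilt, pvChildItems_append_one]
        rcases eq_or_ne i parent with rfl | hne
        · rw [hgetPar]
          show ((arena.getD parent ("", PySem.Dict.empty)).2.insert s arena.length).items = _
          rw [PySem.Dict.items_insert_of_not_contains _ _ hcontains, hitems, hpq]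
          rw [if_pos hCq, hp'last, hnP]
        · rw [hgetOther i (by omega) hne, hR.items i hilt]
          have hCfalse : pvChildC (P.getD i []) p' = false := by
            cases hCb : pvChildC (P.getD i []) p'
            · rfl
            · exfalso
              obtain ⟨_, hdrop2, _⟩ := pvChildC_decomp _ _ hCb
              rw [hp'drop] at hdrop2
              exact hne (pvIdx_unique P hR.nodup hilt hpP (by rw [← hdrop2, hpq]))
          rw [hCfalse]
          simp
      · have hie : i = P.length := by omega
        subst hie
        rw [hP'new, hgetNew', pvChildItems_append_one]
        have hCpp : pvChildC p' p' = false := by simp [pvChildC]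
        have hnil : pvKids P p' = [] := by
          rw [pvKids, List.filter_eq_nil_iff]
          intro jp hjp
          cases hCb : pvChildC p' jp.2
          · simp
          · exfalso
            obtain ⟨_, h2, h3⟩ := pvChildC_decomp _ _ hCb
            obtain ⟨_, hjl, hjg⟩ := pvEnum_mem ([] : List String) P 0 jp hjp
            simp only [Nat.sub_zero] at hjl hjg
            have hj0 : 0 < jp.1 := by
              rcases Nat.eq_zero_or_pos jp.1 with h0 | h
              · exfalso
                rw [h0, hR.head] at hjg
                exact h3 hjg.symm
              · exact h
            obtain ⟨_, htk, _⟩ := hR.node jp.1 hj0 hjl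
            rw [hjg, h2] at htk
            exact hnotinP (List.mem_of_mem_take htk)
        rw [hCpp]
        show (PySem.Dict.empty : PySem.Dict String Nat).items = _
        simp [pvChildItems, hnil]
        rfl
    · simp only [List.length_cons, hlen', hp'len]
    · intro k2 hkb
      have hrevc : ((arena.length :: st').reverse) = st'.reverse ++ [arena.length] := by simp
      have hrlen : st'.reverse.length = m := by rw [List.length_reverse]; exact hlen'
      have hkb' : k2 < m + 1 := by
        have := hkb
        rw [hp'len] at this
        exact this
      have hP'len2 : (P ++ [p']).length = P.length + 1 := by simp
      rcases Nat.lt_or_ge k2 m with hkm | hkm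
      · rw [hrevc, pvGetD_append_lt _ _ _ _ (by omega)]
        obtain ⟨h1, h2⟩ := hok' k2 hkm
        refine ⟨by omega, ?_⟩
        rw [hP'lt _ h1, h2, hp', pvTake_append_left q s k2 (by omega)]
      · have hkm' : k2 = m := by omega
        subst hkm'
        rw [hrevc, ← hrlen, pvGetD_append_self]
        refine ⟨by omega, ?_⟩
        rw [hnP, hP'new, List.take_of_length_le (by omega)]

lemma pvStepBridge (arena : pvArena) (stack : List Nat) (lud : Nat)
    (occ : List (List String)) (pfx : List String) (raw : String)
    (hR : pvRel arena ([] :: pvNodes occ))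
    (hS : pvStackOK ([] :: pvNodes occ) stack pfx) :
    pvRel (pvStep (arena, stack, lud) raw).1 ([] :: pvNodes (pvBStep (occ, pfx, lud) raw).1) ∧
    pvStackOK ([] :: pvNodes (pvBStep (occ, pfx, lud) raw).1)
      (pvStep (arena, stack, lud) raw).2.1 (pvBStep (occ, pfx, lud) raw).2.1 ∧
    (pvStep (arena, stack, lud) raw).2.2 = (pvBStep (occ, pfx, lud) raw).2.2 := by
  have hslen := hS.len
  dsimp only [pvStep, pvBStep]
  rw [hslen]
  by_cases hgt : (raw.toList.length - (raw.toList.dropWhile (fun c => c == ' ')).length) / 2 > 0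
  · simp only [if_pos hgt]
    have h := pvStepCore arena stack occ pfx
      (String.ofList (raw.toList.dropWhile (fun c => c == ' ')))
      (lud + (raw.toList.length - (raw.toList.dropWhile (fun c => c == ' ')).length) / 2)
      (by omega) hR hS
    exact ⟨h.1, h.2, trivial⟩
  · simp only [if_neg hgt]
    have h := pvStepCore arena stack occ pfx
      (String.ofList (raw.toList.dropWhile (fun c => c == ' ')))
      (pfx.length + 1) (by omega) hR hS
    exact ⟨h.1, h.2, trivial⟩

lemma pvPathBridge (path : List String) :
    ∀ (arena : pvArena) (stack : List Nat) (lud : Nat)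
      (occ : List (List String)) (pfx : List String),
    pvRel arena ([] :: pvNodes occ) → pvStackOK ([] :: pvNodes occ) stack pfx →
    pvRel (path.foldl pvStep (arena, stack, lud)).1
        ([] :: pvNodes (path.foldl pvBStep (occ, pfx, lud)).1) ∧
      pvStackOK ([] :: pvNodes (path.foldl pvBStep (occ, pfx, lud)).1)
        (path.foldl pvStep (arena, stack, lud)).2.1 (path.foldl pvBStep (occ, pfx, lud)).2.1 ∧
      (path.foldl pvStep (arena, stack, lud)).2.2 = (path.foldl pvBStep (occ, pfx, lud)).2.2 := by
  induction path with
  | nil => intro arena stack lud occ pfx hR hS; exact ⟨hR, hS, rfl⟩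
  | cons r rest ih =>
    intro arena stack lud occ pfx hR hS
    obtain ⟨hR', hS', hl'⟩ := pvStepBridge arena stack lud occ pfx r hR hS
    simp only [List.foldl_cons]
    have he : pvBStep (occ, pfx, lud) r
        = ((pvBStep (occ, pfx, lud) r).1, (pvBStep (occ, pfx, lud) r).2.1,
           (pvBStep (occ, pfx, lud) r).2.2) := rfl
    have ha : pvStep (arena, stack, lud) r
        = ((pvStep (arena, stack, lud) r).1, (pvStep (arena, stack, lud) r).2.1,
           (pvStep (arena, stack, lud) r).2.2) := rfl
    rw [ha, he, hl']
    exact ih _ _ _ _ _ hR' hS'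

lemma pvStackOK_init (P : List (List String)) (hpos : 0 < P.length)
    (hhead : P.getD 0 [] = []) : pvStackOK P [0] [] := by
  refine ⟨rfl, ?_⟩
  intro k hk
  have hk0 : k = 0 := by simpa using hk
  subst hk0
  refine ⟨by simpa using hpos, by simpa using hhead⟩

lemma pvBuildBridge (aps : List (List String)) :
    ∀ (arena : pvArena) (occ : List (List String)), pvRel arena ([] :: pvNodes occ) →
    pvRel (aps.foldl (fun arena path => (path.foldl pvStep (arena, [0], 0)).1) arena)
      ([] :: pvNodes (aps.foldl (fun occ path => (path.foldl pvBStep (occ, [], 0)).1) occ)) := by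
  induction aps with
  | nil => intro arena occ h; exact h
  | cons p rest ih =>
    intro arena occ h
    simp only [List.foldl_cons]
    exact ih _ _ (pvPathBridge p arena [0] 0 occ [] h (pvStackOK_init _ h.pos h.head)).1

lemma pvRel_init : pvRel [("Testing messages in parallel", PySem.Dict.empty)] [[]] := by
  refine ⟨rfl, by simp, rfl, by simp, ?_, ?_⟩
  · intro j hj0 hj1; simp at hj1; omega
  · intro i hi
    have hi0 : i = 0 := by simp at hi; omega
    subst hi0
    simp [pvD, pvChildItems, pvKids, pvEnum, pvChildC, PySem.Dict.empty]


lemma pvBridge (arena : pvArena) (P : List (List String)) (hR : pvRel arena P) :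
    ∀ (n i fa fb : Nat) (lines : List String), i < P.length → P.length - i ≤ n →
      P.length - i ≤ fa → P.length - i ≤ fb →
      pvAppendChildren arena fa i lines = pvEmitRec (P.drop 1) fb (P.getD i []) lines := by
  intro n
  induction n with
  | zero => intro i fa fb lines hi hn _ _; omega
  | succ n ih =>
    intro i fa fb lines hi hn hfa hfb
    obtain ⟨ga, rfl⟩ : ∃ g, fa = g + 1 := ⟨fa - 1, by omega⟩
    obtain ⟨gb, rfl⟩ : ∃ g, fb = g + 1 := ⟨fb - 1, by omega⟩
    set q := P.getD i [] with hq
    simp only [pvAppendChildren, pvEmitRec]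
    have hval : (arena.getD i ("", PySem.Dict.empty)).2.values
        = (pvKids P q).map (fun jp => jp.1) := by
      show (arena.getD i ("", PySem.Dict.empty)).2.items.map (fun p => p.2) = _
      rw [hR.items i hi]
      simp only [pvChildItems, List.map_map]
      rfl
    obtain ⟨rest, hPr⟩ : ∃ rest, P = [] :: rest := by
      cases hcase : P with
      | nil => rw [hcase] at hi; simp at hi
      | cons h t =>
        refine ⟨t, ?_⟩
        have hh : h = [] := by
          have h0 := hR.head
          rw [hcase] at h0
          simpa using h0
        rw [hh]
    have hpred : (fun (p : List String) => (p.length == q.length + 1 && p.take q.length == q))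
        = pvChildC q := rfl
    rw [hval, List.foldl_map,
      PySem.List.foldl_if_eq_foldl_filter
        (p := fun (p : List String) => (p.length == q.length + 1 && p.take q.length == q))
        (f := fun lines p => pvEmitRec (P.drop 1) gb p
          (if !pvGroupLabel (p.getLastD "") then lines ++ [p.getLastD ""] else lines)),
      hpred]
    have hfil : (P.drop 1).filter (pvChildC q) = (pvKids P q).map (fun jp => jp.2) := by
      rw [pvKids, pvEnum_filter_map_snd (pvChildC q) P 0, hPr]
      simp [pvChildC_nil]
    rw [hfil, List.foldl_map]
    apply PySem.List.foldl_congr_mem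
    intro acc jp hjp
    obtain ⟨hjlt, hjget, hjC⟩ := pvKids_mem P q jp hjp
    obtain ⟨hdec, hdropl, hne⟩ := pvChildC_decomp q jp.2 hjC
    have hj0 : 0 < jp.1 := by
      rcases Nat.eq_zero_or_pos jp.1 with h0 | h
      · exfalso
        rw [h0, hR.head] at hjget
        exact hne hjget.symm
      · exact h
    obtain ⟨_, htake, hlab⟩ := hR.node jp.1 hj0 hjlt
    have hij : i < jp.1 := by
      rw [hjget, hdropl] at htake
      obtain ⟨k, hk, hke⟩ := List.mem_iff_getElem.mp htake
      have hkl : k < jp.1 := by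
        have hk' := hk
        simp only [List.length_take] at hk'
        omega
      have hkP : k < P.length := by omega
      have hPk : P.getD k [] = q := by
        rw [pvGetD_lt _ _ _ hkP, ← hke, List.getElem_take]
      have hki : k = i := pvIdx_unique P hR.nodup hkP hi (by rw [hPk, hq])
      omega
    have hih := ih jp.1 ga gb
      (if !pvGroupLabel (jp.2.getLastD "") then acc ++ [jp.2.getLastD ""] else acc)
      hjlt (by omega) (by omega) (by omega)
    rw [hjget] at hih
    have hlab2 : (arena.getD jp.1 ("", PySem.Dict.empty)).1 = jp.2.getLastD "" := by
      rw [hlab, hjget]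
    rw [hlab2]
    exact hih

-- ===== VERDICT (by name: the statement is the Claim_ definition above) =====
theorem build_parallel_test_status_message_spec : Claim_equal_build_parallel_test_status_message := by
  intro aps _
  show _ = build_parallel_test_status_message_alt aps
  unfold build_parallel_test_status_message build_parallel_test_status_message_alt
  have hR : pvRel (pvBuild aps) ([] :: pvNodes (pvOcc aps)) :=
    pvBuildBridge aps _ [] pvRel_init
  dsimp only
  congr 1
  have hlen : (pvBuild aps).length = (pvNodes (pvOcc aps)).length + 1 := by
    simpa using hR.len
  have h := pvBridge (pvBuild aps) ([] :: pvNodes (pvOcc aps)) hR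
    ((pvNodes (pvOcc aps)).length + 1) 0 (pvBuild aps).length
    ((pvNodes (pvOcc aps)).length + 1) []
    (by simp) (by simp) (by simp [hlen]) (by simp)
  simpa using h
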